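-- pv_equiv track=rewrite | github.com/Beastsl123123/Scraperly | scraperly_5.py | assign_importance
-- ===== SOURCE A (Python) =====
-- def assign_importance(headline):
--     high_keywords = [
--         "crisis", "war", "breaking", "urgent", "alert",
--         "disaster", "emergency", "dead", "attack",
--     ]
--     medium_keywords = [
--         "election", "government", "protest", "policy", "update", "accident",
--     ]
--     lower_text = headline.lower()
--     if any(k in lower_text for k in high_keywords):
--         return "High"
--     elif any(k in lower_text for k in medium_keywords):
--         return "Medium"
--     else:
--         return "Low"
-- ===== SOURCE B (Python) =====
-- _KEYWORD_PRIORITY = [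
--     ("crisis", 2), ("war", 2), ("breaking", 2), ("urgent", 2), ("alert", 2),
--     ("disaster", 2), ("emergency", 2), ("dead", 2), ("attack", 2),
--     ("election", 1), ("government", 1), ("protest", 1), ("policy", 1),
--     ("update", 1), ("accident", 1),
-- ]
--
-- _LABELS = {2: "High", 1: "Medium", 0: "Low"}
--
--
-- def assign_importance(headline):
--     lower_text = headline.lower()
--     best = 0
--     for keyword, priority in _KEYWORD_PRIORITY:
--         if keyword in lower_text:
--             best = max(best, priority)
--     return _LABELS[best]
-- ===== Notes on version B (the rewrite author's own statement) =====
-- stated objective: alternative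
-- what changed: Replaced the two short-circuited group scans (high then medium) by a single pass over one keyword-to-priority table that accumulates the maximum matched priority, then maps the priority back to its label.
import Mathlib
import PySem

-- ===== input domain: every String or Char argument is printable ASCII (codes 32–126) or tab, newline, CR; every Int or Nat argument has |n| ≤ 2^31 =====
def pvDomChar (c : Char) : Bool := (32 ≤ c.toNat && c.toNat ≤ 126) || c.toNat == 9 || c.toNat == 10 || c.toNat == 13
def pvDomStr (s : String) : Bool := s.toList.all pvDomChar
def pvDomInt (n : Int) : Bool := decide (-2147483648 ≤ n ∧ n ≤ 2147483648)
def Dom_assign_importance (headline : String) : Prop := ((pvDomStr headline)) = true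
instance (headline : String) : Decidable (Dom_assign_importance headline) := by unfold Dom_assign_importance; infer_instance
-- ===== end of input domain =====

-- B replaces A's two short-circuited keyword-group scans by a single pass over one
-- keyword→priority table accumulating the maximum matched priority, then maps it to a label.


-- ===== PORT A =====
def assign_importance (headline : String) : String :=
  let high_keywords : List String :=
    ["crisis", "war", "breaking", "urgent", "alert",
     "disaster", "emergency", "dead", "attack"]
  let medium_keywords : List String :=
    ["election", "government", "protest", "policy", "update", "accident"]
  let lower_text := PySem.Str.lower headline
  if high_keywords.any (fun k => PySem.Str.isIn k lower_text) then "High"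
  else if medium_keywords.any (fun k => PySem.Str.isIn k lower_text) then "Medium"
  else "Low"

-- ===== PORT B =====
def keywordPriority : List (String × Int) :=
  [("crisis", 2), ("war", 2), ("breaking", 2), ("urgent", 2), ("alert", 2),
   ("disaster", 2), ("emergency", 2), ("dead", 2), ("attack", 2),
   ("election", 1), ("government", 1), ("protest", 1), ("policy", 1),
   ("update", 1), ("accident", 1)]

def assign_importance_alt (headline : String) : String :=
  let lower_text := PySem.Str.lower headline
  let best : Int := keywordPriority.foldl
    (fun b kp => if PySem.Str.isIn kp.1 lower_text then max b kp.2 else b) 0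
  if best == 2 then "High" else if best == 1 then "Medium" else "Low"

-- ===== PRECONDITION & SPEC =====
def Spec_assign_importance (headline : String) (out : String) : Prop := out = assign_importance_alt headline
instance (headline : String) (out : String) : Decidable (Spec_assign_importance headline out) := by unfold Spec_assign_importance; infer_instance

-- ===== CLAIM (what is proved, stated in full; the proofs are below) =====
def Claim_equal_assign_importance : Prop := ∀ (headline : String), Dom_assign_importance headline → Spec_assign_importance headline (assign_importance headline)

-- ===== LEMMAS AND PROOFS =====

-- Folding the max-accumulator over keywords that all carry the same priority p
-- either raises the accumulator to max b p (some keyword matches) or leaves it.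
theorem foldl_const_prio (t : String) (p : Int) (ks : List String) (b : Int) :
    (ks.map (fun s => (s, p))).foldl
      (fun b kp => if PySem.Str.isIn kp.1 t then max b kp.2 else b) b
    = if ks.any (fun k => PySem.Str.isIn k t) then max b p else b := by
  induction ks generalizing b with
  | nil => simp
  | cons k ks ih =>
    simp only [List.map_cons, List.foldl_cons, List.any_cons]
    rw [ih]
    rcases Bool.eq_false_or_eq_true (PySem.Str.isIn k t) with h | h <;>
      rcases Bool.eq_false_or_eq_true (ks.any fun k => PySem.Str.isIn k t) with h2 | h2 <;>
      simp only [h, h2] <;> simp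

theorem main_eq (t : String) :
    (if (["crisis", "war", "breaking", "urgent", "alert",
          "disaster", "emergency", "dead", "attack"] : List String).any
          (fun k => PySem.Str.isIn k t) then "High"
     else if (["election", "government", "protest", "policy", "update", "accident"] :
          List String).any (fun k => PySem.Str.isIn k t) then "Medium"
     else "Low")
    = (let best : Int := keywordPriority.foldl
          (fun b kp => if PySem.Str.isIn kp.1 t then max b kp.2 else b) 0
       if best == 2 then "High" else if best == 1 then "Medium" else "Low") := by
  have hsplit : keywordPriority =
      (["crisis", "war", "breaking", "urgent", "alert",
        "disaster", "emergency", "dead", "attack"].map (fun s => (s, (2 : Int)))) ++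
      (["election", "government", "protest", "policy", "update", "accident"].map
        (fun s => (s, (1 : Int)))) := rfl
  rw [hsplit]
  show _ = (if _ == (2 : Int) then "High" else _)
  rw [List.foldl_append, foldl_const_prio, foldl_const_prio]
  generalize (["crisis", "war", "breaking", "urgent", "alert",
      "disaster", "emergency", "dead", "attack"] : List String).any
      (fun k => PySem.Str.isIn k t) = bH
  generalize (["election", "government", "protest", "policy", "update", "accident"] :
      List String).any (fun k => PySem.Str.isIn k t) = bM
  revert bH bM
  decide

-- ===== VERDICT (by name: the statement is the Claim_ definition above) =====
theorem assign_importance_spec : Claim_equal_assign_importance := by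
  intro headline _
  unfold Spec_assign_importance assign_importance assign_importance_alt
  exact main_eq (PySem.Str.lower headline)
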